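-- pv_equiv track=rewrite | github.com/stal-ix/ix | repology.py | prepend
-- ===== SOURCE A (Python) =====
-- def prepend(data, block):
--     for l in data.split('\n'):
--         if l:
--             yield l
--         elif block:
--             yield l
--             yield block
--             block = None
--         else:
--             yield l
-- ===== SOURCE B (Python) =====
-- def prepend(data, block):
--     lines = data.split('\n')
--     if block:
--         for i, l in enumerate(lines):
--             if not l:
--                 yield from lines[:i + 1]
--                 yield block
--                 yield from lines[i + 1:]
--                 return
--     yield from lines
-- ===== Notes on version B (the rewrite author's own statement) =====
-- stated objective: simpler
-- what changed: replaces A's per-line mutable-flag branching with locating the first empty line once and emitting the three segments (prefix incl. empty line, block, suffix), falling through to a plain pass when block is falsy or no empty line exists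
import Mathlib
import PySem

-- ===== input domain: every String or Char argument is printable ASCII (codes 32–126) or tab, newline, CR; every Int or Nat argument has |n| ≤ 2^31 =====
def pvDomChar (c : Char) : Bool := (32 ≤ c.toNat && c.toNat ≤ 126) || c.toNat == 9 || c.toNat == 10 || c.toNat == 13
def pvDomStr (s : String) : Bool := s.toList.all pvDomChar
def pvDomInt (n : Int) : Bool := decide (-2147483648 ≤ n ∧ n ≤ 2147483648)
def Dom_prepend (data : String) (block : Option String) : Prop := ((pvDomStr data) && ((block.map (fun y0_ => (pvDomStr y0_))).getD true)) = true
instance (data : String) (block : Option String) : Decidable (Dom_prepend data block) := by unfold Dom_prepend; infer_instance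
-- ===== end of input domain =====

-- B replaces A's per-line mutable-flag loop by locating the first empty line once and emitting
-- prefix / block / suffix segments (objective: simpler decomposition; same cost).


-- ===== PORT A =====
-- data.split('\n') (the Python builtin, used verbatim by both sources)
def pvSplitNL (data : String) : List String :=
  (PySem.Chars.splitOn data.toList "\n".toList).map String.ofList

-- the generator loop: yields accumulated front-to-back, `block` is the mutable flag
def prependGo : List String → Option String → List String
  | [], _ => []
  | l :: ls, blk =>
    if l ≠ "" then l :: prependGo ls blk
    else
      match blk with
      | some b => if b ≠ "" then l :: b :: prependGo ls none else l :: prependGo ls (some b)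
      | none => l :: prependGo ls none

def prepend (data : String) (block : Option String) : List String :=
  prependGo (pvSplitNL data) block

-- ===== PORT B =====
def prepend_alt (data : String) (block : Option String) : List String :=
  let lines := pvSplitNL data
  match block with
  | some b =>
    if b ≠ "" then
      match lines.findIdx? (· == "") with
      | some i => lines.take (i + 1) ++ b :: lines.drop (i + 1)
      | none => lines
    else lines
  | none => lines

-- ===== PRECONDITION & SPEC =====
def Spec_prepend (data : String) (block : Option String) (out : List String) : Prop := out = prepend_alt data block
instance (data : String) (block : Option String) (out : List String) : Decidable (Spec_prepend data block out) := by unfold Spec_prepend; infer_instance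

-- ===== CLAIM (what is proved, stated in full; the proofs are below) =====
def Claim_equal_prepend : Prop := ∀ (data : String) (block : Option String), Dom_prepend data block → Spec_prepend data block (prepend data block)

-- ===== LEMMAS AND PROOFS =====
theorem prependGo_none (ls : List String) : prependGo ls none = ls := by
  induction ls with
  | nil => rfl
  | cons l ls ih => by_cases h : l = "" <;> simp [prependGo, h, ih]

theorem prependGo_empty (ls : List String) : prependGo ls (some "") = ls := by
  induction ls with
  | nil => rfl
  | cons l ls ih => by_cases h : l = "" <;> simp [prependGo, h, ih]

theorem prependGo_some (ls : List String) (b : String) (hb : b ≠ "") :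
    prependGo ls (some b) =
      match ls.findIdx? (· == "") with
      | some i => ls.take (i + 1) ++ b :: ls.drop (i + 1)
      | none => ls := by
  induction ls with
  | nil => rfl
  | cons l ls ih =>
    by_cases h : l = ""
    · simp [prependGo, h, hb, List.findIdx?_cons, prependGo_none]
    · simp only [prependGo, h, ne_eq, not_false_iff, if_true, ih, List.findIdx?_cons,
        beq_iff_eq]
      cases hf : ls.findIdx? (· == "") with
      | none => simp
      | some i => simp [List.take_succ_cons, List.drop_succ_cons]

-- ===== VERDICT (by name: the statement is the Claim_ definition above) =====
theorem prepend_spec : Claim_equal_prepend := by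
  intro data block _
  unfold Spec_prepend prepend prepend_alt
  cases block with
  | none => simp [prependGo_none]
  | some b =>
    by_cases hb : b = ""
    · simp [hb, prependGo_empty]
    · simp only [hb, ne_eq, not_false_iff, if_true, prependGo_some _ b hb]
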